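-- pv_equiv track=rewrite | github.com/Bibekbb/learn-python-complete | OOP/code/loop1.py | filter_lines
-- ===== SOURCE A (Python) =====
-- def filter_lines(lines, filtered):
--     if not lines:
--         return filtered
--     line = lines[0].strip()
--     if line:
--         return filter_lines(lines[1:], filtered + [line])
--     else:
--         return filter_lines(lines[1:], filtered)
-- ===== SOURCE B (Python) =====
-- def filter_lines(lines, filtered):
--     result = list(filtered)
--     for line in lines:
--         s = line.strip()
--         if s:
--             result.append(s)
--     return result
-- ===== Notes on version B (the rewrite author's own statement) =====
-- stated objective: faster
-- what changed: Replaces tail recursion that copies the whole accumulator with '+' on every call by a single iterative loop appending to one local list.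
import Mathlib
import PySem

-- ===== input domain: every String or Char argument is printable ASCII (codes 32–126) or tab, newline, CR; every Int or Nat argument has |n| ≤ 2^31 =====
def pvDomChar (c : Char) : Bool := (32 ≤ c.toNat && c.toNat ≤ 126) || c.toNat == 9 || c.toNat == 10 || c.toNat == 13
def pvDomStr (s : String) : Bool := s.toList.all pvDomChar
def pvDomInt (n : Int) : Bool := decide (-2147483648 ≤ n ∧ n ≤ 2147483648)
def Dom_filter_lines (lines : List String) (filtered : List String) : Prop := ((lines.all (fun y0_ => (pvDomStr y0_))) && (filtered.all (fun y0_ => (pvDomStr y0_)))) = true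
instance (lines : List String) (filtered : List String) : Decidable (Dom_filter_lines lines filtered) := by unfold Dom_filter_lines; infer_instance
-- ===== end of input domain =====

-- B replaces A's tail recursion (which rebuilds the accumulator with '+' each call) by one iterative loop appending to a local list; simpler, same values.

-- ===== PORT A =====
def filter_lines (lines : List String) (filtered : List String) : List String :=
  match lines with
  | [] => filtered
  | l :: rest =>
    let line := PySem.Str.strip l
    if line ≠ "" then filter_lines rest (filtered ++ [line])
    else filter_lines rest filtered

-- ===== PORT B =====
def filter_lines_alt (lines : List String) (filtered : List String) : List String :=
  lines.foldl (fun result line =>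
    let s := PySem.Str.strip line
    if s ≠ "" then result ++ [s] else result) filtered

-- ===== PRECONDITION & SPEC =====
def Spec_filter_lines (lines : List String) (filtered : List String) (out : List String) : Prop := out = filter_lines_alt lines filtered
instance (lines : List String) (filtered : List String) (out : List String) : Decidable (Spec_filter_lines lines filtered out) := by unfold Spec_filter_lines; infer_instance

-- ===== CLAIM (what is proved, stated in full; the proofs are below) =====
def Claim_equal_filter_lines : Prop := ∀ (lines : List String) (filtered : List String), Dom_filter_lines lines filtered → Spec_filter_lines lines filtered (filter_lines lines filtered)

-- ===== LEMMAS AND PROOFS =====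
theorem filter_lines_eq_alt (lines filtered : List String) :
    filter_lines lines filtered = filter_lines_alt lines filtered := by
  induction lines generalizing filtered with
  | nil => rfl
  | cons l rest ih =>
    simp only [filter_lines, filter_lines_alt, List.foldl_cons]
    by_cases h : PySem.Str.strip l ≠ "" <;> simp [h, ih, filter_lines_alt]

-- ===== VERDICT (by name: the statement is the Claim_ definition above) =====
theorem filter_lines_spec : Claim_equal_filter_lines := by
  intro lines filtered _
  exact filter_lines_eq_alt lines filtered
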